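-- pv_equiv track=rewrite | github.com/zaneWWWWWW/largeModelAgents | model/assessment/labeling/scripts/common.py | clip_conversation
-- ===== SOURCE A (Python) =====
-- def clip_conversation(convo, max_chars=2000, max_turns=12):
--     total = 0
--     trimmed = []
--     for t in reversed(convo):
--         total += len(t.get('text', ''))
--         trimmed.append(t)
--         if total >= max_chars:
--             break
--     trimmed = list(reversed(trimmed))
--     if len(trimmed) > max_turns:
--         trimmed = trimmed[-max_turns:]
--     return trimmed
-- ===== SOURCE B (Python) =====
-- def clip_conversation(convo, max_chars=2000, max_turns=12):
--     lens = [len(t.get('text', '')) for t in convo]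
--     acc = sum(lens)
--     start = 0
--     for i, L in enumerate(lens):
--         if acc >= max_chars:
--             start = i
--         acc -= L
--     result = convo[start:]
--     if len(result) > max_turns:
--         result = result[-max_turns:]
--     return result
-- ===== Notes on version B (the rewrite author's own statement) =====
-- stated objective: alternative
-- what changed: Replaced the reversed append-then-reverse accumulation with a forward pass over per-turn text lengths that maintains a running suffix sum to compute a start index, returning slices of the original list.
import Mathlib
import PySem

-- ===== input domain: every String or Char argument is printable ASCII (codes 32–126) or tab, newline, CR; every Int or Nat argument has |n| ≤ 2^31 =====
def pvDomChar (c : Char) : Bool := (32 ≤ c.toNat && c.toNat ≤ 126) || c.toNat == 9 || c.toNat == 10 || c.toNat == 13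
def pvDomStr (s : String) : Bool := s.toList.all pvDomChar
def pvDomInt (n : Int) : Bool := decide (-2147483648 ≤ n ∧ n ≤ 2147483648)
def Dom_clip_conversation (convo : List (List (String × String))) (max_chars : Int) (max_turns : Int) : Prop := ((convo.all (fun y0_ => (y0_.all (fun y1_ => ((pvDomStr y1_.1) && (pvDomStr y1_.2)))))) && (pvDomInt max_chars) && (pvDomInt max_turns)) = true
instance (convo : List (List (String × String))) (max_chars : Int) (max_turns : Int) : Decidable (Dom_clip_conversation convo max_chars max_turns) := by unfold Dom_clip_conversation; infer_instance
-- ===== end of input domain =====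

-- B replaces A's reversed append-and-reverse accumulation by a forward pass over per-turn
-- text lengths maintaining a running suffix sum to compute a start index, then one slice
-- (objective: alternative decomposition, same cost).

-- shared helper: len(t.get('text', ''))
def pvTextLen (t : List (String × String)) : Int :=
  PySem.Str.len (PySem.Dict.getD (PySem.Dict.mk t) "text" "")

-- ===== PORT A =====
-- the 'for t in reversed(convo): … break' loop, state (total, trimmed)
def clipLoopA (max_chars : Int) : List (List (String × String)) → Int → List (List (String × String)) → List (List (String × String))
  | [], _, trimmed => trimmed
  | t :: rest, total, trimmed =>
    let total' := total + pvTextLen t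
    let trimmed' := trimmed ++ [t]
    if total' ≥ max_chars then trimmed' else clipLoopA max_chars rest total' trimmed'

def clip_conversation (convo : List (List (String × String))) (max_chars : Int) (max_turns : Int) : List (List (String × String)) :=
  let trimmed := clipLoopA max_chars convo.reverse 0 []
  let trimmed := trimmed.reverse
  if PySem.List.len trimmed > max_turns then PySem.List.slice trimmed (some (-max_turns)) none else trimmed

-- ===== PORT B =====
def clip_conversation_alt (convo : List (List (String × String))) (max_chars : Int) (max_turns : Int) : List (List (String × String)) :=
  let lens := convo.map (fun t => pvTextLen t)
  -- forward pass: acc is the running suffix sum, start the last index whose suffix reached max_chars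
  let st := (PySem.List.enumerate lens 0).foldl
    (fun (st : Int × Int) (p : Int × Int) =>
      (st.1 - p.2, if st.1 ≥ max_chars then p.1 else st.2)) (lens.sum, 0)
  let start := st.2
  let result := PySem.List.slice convo (some start) none
  if PySem.List.len result > max_turns then PySem.List.slice result (some (-max_turns)) none else result

-- ===== PRECONDITION & SPEC =====
def Spec_clip_conversation (convo : List (List (String × String))) (max_chars : Int) (max_turns : Int) (out : List (List (String × String))) : Prop := out = clip_conversation_alt convo max_chars max_turns
instance (convo : List (List (String × String))) (max_chars : Int) (max_turns : Int) (out : List (List (String × String))) : Decidable (Spec_clip_conversation convo max_chars max_turns out) := by unfold Spec_clip_conversation; infer_instance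

-- ===== CLAIM (what is proved, stated in full; the proofs are below) =====
def Claim_equal_clip_conversation : Prop := ∀ (convo : List (List (String × String))) (max_chars : Int) (max_turns : Int), Dom_clip_conversation convo max_chars max_turns → Spec_clip_conversation convo max_chars max_turns (clip_conversation convo max_chars max_turns)

-- ===== LEMMAS AND PROOFS =====

-- cIdx lens mc = how many entries A's loop consumes from a (reversed) length list lens
-- with threshold mc: the first prefix whose sum reaches mc, else all of them.
def cIdx : List Int → Int → Nat
  | [], _ => 0
  | l :: r, mc => if l ≥ mc then 1 else 1 + cIdx r (mc - l)

theorem cIdx_le (lens : List Int) (mc : Int) : cIdx lens mc ≤ lens.length := by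
  induction lens generalizing mc with
  | nil => simp [cIdx]
  | cons l r ih =>
    simp only [cIdx, List.length_cons]
    split
    · omega
    · have := ih (mc - l); omega

theorem pvTextLen_nonneg (t : List (String × String)) : 0 ≤ pvTextLen t := by
  simp [pvTextLen, PySem.Str.len_eq]

theorem cIdx_of_sum_lt (lens : List Int) (mc : Int) (hn : ∀ l ∈ lens, 0 ≤ l)
    (h : lens.sum < mc) : cIdx lens mc = lens.length := by
  induction lens generalizing mc with
  | nil => simp [cIdx]
  | cons l r ih =>
    have hr : 0 ≤ r.sum := List.sum_nonneg (fun x hx => hn x (List.mem_cons_of_mem _ hx))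
    have hl : l < mc := by simp only [List.sum_cons] at h; omega
    simp only [cIdx, List.length_cons, if_neg (by omega : ¬ l ≥ mc)]
    rw [ih (mc - l) (fun x hx => hn x (List.mem_cons_of_mem _ hx))
      (by simp only [List.sum_cons] at h; omega)]
    omega

theorem clipLoopA_eq (mc : Int) (r : List (List (String × String))) :
    ∀ (total : Int) (acc : List (List (String × String))),
    clipLoopA mc r total acc = acc ++ r.take (cIdx (r.map pvTextLen) (mc - total)) := by
  induction r with
  | nil => intro total acc; simp [clipLoopA, cIdx]
  | cons t rest ih =>
    intro total acc
    simp only [clipLoopA, List.map_cons, cIdx]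
    by_cases h : total + pvTextLen t ≥ mc
    · rw [if_pos h, if_pos (by omega : pvTextLen t ≥ mc - total)]
      simp
    · rw [if_neg h, if_neg (by omega : ¬ pvTextLen t ≥ mc - total), ih]
      have : mc - (total + pvTextLen t) = mc - total - pvTextLen t := by ring
      simp [this, List.take_succ_cons, Nat.add_comm 1]
    
theorem foldB_eq (mc : Int) (lens : List Int) :
    ∀ (e off s0 : Int), (∀ l ∈ lens, 0 ≤ l) →
    (PySem.List.enumerate lens off).foldl
      (fun (st : Int × Int) (p : Int × Int) =>
        (st.1 - p.2, if st.1 ≥ mc then p.1 else st.2)) (lens.sum + e, s0)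
    = (e, if lens ≠ [] ∧ lens.sum + e ≥ mc
            then off + ((lens.length - cIdx lens.reverse (mc - e) : Nat) : Int)
            else s0) := by
  induction lens using List.reverseRecOn with
  | nil => intro e off s0 _; simp [PySem.List.enumerate_nil]
  | append_singleton xs l ih =>
    intro e off s0 hn
    have hx : ∀ x ∈ xs, 0 ≤ x := fun x hx => hn x (by simp [hx])
    have hxsum : 0 ≤ xs.sum := List.sum_nonneg hx
    have hc : cIdx xs.reverse (mc - (l + e)) ≤ xs.length := by
      simpa using cIdx_le xs.reverse (mc - (l + e))
    rw [PySem.List.enumerate_append, List.foldl_append]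
    have hsum : (xs ++ [l]).sum + e = xs.sum + (l + e) := by simp; ring
    rw [hsum, ih (l + e) off s0 hx]
    simp only [PySem.List.enumerate_cons, PySem.List.enumerate_nil, List.foldl_cons,
      List.foldl_nil, List.reverse_append, List.reverse_singleton, List.singleton_append,
      List.length_append, List.length_singleton, cIdx,
      ne_eq, List.append_eq_nil_iff, List.cons_ne_self, and_false, not_false_eq_true, true_and]
    by_cases h1 : l + e ≥ mc
    · rw [if_pos h1, if_pos (show xs.sum + (l + e) ≥ mc by omega),
        if_pos (by omega : l ≥ mc - e)]
      exact Prod.ext (by omega) (by simp)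
    · rw [if_neg h1, if_neg (by omega : ¬ l ≥ mc - e)]
      have he : mc - e - l = mc - (l + e) := by ring
      rw [he]
      by_cases h2 : xs.sum + (l + e) ≥ mc
      · have hxs : xs ≠ [] := by
          rintro rfl; simp at h2; omega
        rw [if_pos ⟨hxs, h2⟩, if_pos h2]
        exact Prod.ext (by omega) (by simp only []; omega)
      · rw [if_neg (fun h => h2 h.2), if_neg h2]
        exact Prod.ext (by omega) rfl

theorem pre_cap_eq (convo : List (List (String × String))) (mc : Int) :
    (clipLoopA mc convo.reverse 0 []).reverse
    = PySem.List.slice convo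
        (some ((PySem.List.enumerate (convo.map (fun t => pvTextLen t)) 0).foldl
          (fun (st : Int × Int) (p : Int × Int) =>
            (st.1 - p.2, if st.1 ≥ mc then p.1 else st.2))
          ((convo.map (fun t => pvTextLen t)).sum, 0)).2) none := by
  set lens := convo.map (fun t => pvTextLen t) with hlens
  have hn : ∀ l ∈ lens, 0 ≤ l := by
    intro l hl
    rw [hlens] at hl
    obtain ⟨t, _, rfl⟩ := List.mem_map.mp hl
    exact pvTextLen_nonneg t
  have hA : (clipLoopA mc convo.reverse 0 []).reverse
      = convo.drop (convo.length - cIdx lens.reverse mc) := by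
    rw [clipLoopA_eq]
    simp only [List.nil_append, List.map_reverse, ← hlens]
    rw [sub_zero, List.take_reverse, List.reverse_reverse]
  have hB := foldB_eq mc lens 0 0 0 hn
  rw [add_zero] at hB
  rw [hB]
  by_cases h : lens ≠ [] ∧ lens.sum ≥ mc
  · rw [if_pos h]
    simp only [zero_add]
    rw [PySem.List.slice_from _ (by positivity)]
    rw [hA, Int.toNat_natCast]
    congr 1
    rw [hlens]; simp
  · rw [if_neg h]
    rw [PySem.List.slice_from _ le_rfl]
    rw [hA]
    rcases not_and_or.mp h with h' | h'
    · have : lens = [] := not_not.mp h'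
      have hc : convo = [] := by
        rw [hlens] at this; exact List.map_eq_nil_iff.mp this
      simp [hc]
    · have : cIdx lens.reverse mc = lens.reverse.length := by
        apply cIdx_of_sum_lt _ _ (by simpa using hn) (by simpa using not_le.mp h')
      rw [this]
      simp [hlens]

-- ===== VERDICT (by name: the statement is the Claim_ definition above) =====
theorem clip_conversation_spec : Claim_equal_clip_conversation := by
  intro convo mc mt _
  show clip_conversation convo mc mt = clip_conversation_alt convo mc mt
  exact congrArg
    (fun x => if PySem.List.len x > mt then PySem.List.slice x (some (-mt)) none else x)
    (pre_cap_eq convo mc)
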